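-- pv_equiv track=rewrite | github.com/Muzzle-kr/AlgorithmAutoSave | 프로그래머스/unrated/155652. 둘만의 암호/둘만의 암호.py | solution
-- ===== SOURCE A (Python) =====
-- def solution(s, skip, index):
--     answer = ''
--     skipArr = [ord(i) for i in skip]
--
--     for w in s:
--         unicodeNum = ord(w)
--
--
--         for _ in range(index):
--             unicodeNum += 1
--
--             if unicodeNum > 122:
--                 unicodeNum = 97 + (unicodeNum - 123)
--
--             while unicodeNum in skipArr:
--                 unicodeNum += 1
--                 if unicodeNum > 122:
--                     unicodeNum = 97 + (unicodeNum - 123)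
--
--         answer += chr(unicodeNum)
--     return answer
-- ===== SOURCE B (Python) =====
-- def solution(s, skip, index):
--     blocked = {ord(c) for c in skip}
--     allowed = [v for v in range(97, 123) if v not in blocked]
--     allowed_set = set(allowed)
--
--     def step(v):
--         # advance by one with z->a wraparound, then move past skipped codes
--         v = v + 1 if v <= 121 else v - 25
--         while v in blocked:
--             v = v + 1 if v <= 121 else v - 25
--         return v
--
--     def shift(v, k):
--         # walk step by step only until we land on an allowed lowercase letter,
--         # then jump the remaining steps at once around the allowed cycle
--         while k > 0 and v not in allowed_set:
--             v = step(v)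
--             k -= 1
--         if k == 0:
--             return v
--         p = allowed.index(v)
--         return allowed[(p + k) % len(allowed)]
--
--     return ''.join(chr(shift(ord(w), max(index, 0))) for w in s)
-- ===== Notes on version B (the rewrite author's own statement) =====
-- stated objective: faster
-- what changed: Instead of simulating all `index` single-character advances, B precomputes the cycle of allowed lowercase codes, walks at most ~120 steps until the character enters that cycle, and then jumps the remaining steps in one modular-arithmetic index into the cycle.
-- outside the precondition, e.g. on solution('A', 'abcdefghijklmnopqrstuvwxyz', 3): A returns 'D', B returns 'D'
import Mathlib
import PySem

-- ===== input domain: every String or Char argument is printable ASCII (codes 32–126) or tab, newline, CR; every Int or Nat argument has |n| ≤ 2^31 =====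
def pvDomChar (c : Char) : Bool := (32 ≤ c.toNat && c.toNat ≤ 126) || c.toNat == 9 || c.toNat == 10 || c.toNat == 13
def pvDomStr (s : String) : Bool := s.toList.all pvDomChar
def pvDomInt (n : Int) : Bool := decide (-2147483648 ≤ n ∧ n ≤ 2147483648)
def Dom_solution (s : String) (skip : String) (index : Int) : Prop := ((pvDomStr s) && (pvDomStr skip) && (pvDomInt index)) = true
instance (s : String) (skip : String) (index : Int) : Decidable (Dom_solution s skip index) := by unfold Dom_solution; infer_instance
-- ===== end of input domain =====

-- B replaces A's per-character `index`-step simulation by a short walk into the cycle of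
-- allowed lowercase codes followed by one modular jump (objective: faster in `index`).

-- ===== PORT A =====
-- `if unicodeNum > 122: unicodeNum = 97 + (unicodeNum - 123)`
def pvWrapA (v : Int) : Int := if v > 122 then 97 + (v - 123) else v

-- the inner `while unicodeNum in skipArr` loop, fueled; fuel 200 is never exhausted on
-- inputs admitted by Pre_solution (the loop visits at most ~140 distinct values there)
def pvSkipLoopA (bl : List Int) : Nat → Int → Int
  | 0, v => v
  | f+1, v => if v ∈ bl then pvSkipLoopA bl f (pvWrapA (v+1)) else v

-- one iteration of `for _ in range(index)`
def pvStepA (bl : List Int) (v : Int) : Int := pvSkipLoopA bl 200 (pvWrapA (v+1))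

-- `for _ in range(index)` runs max(index,0) = index.toNat times
def pvForA (bl : List Int) : Nat → Int → Int
  | 0, v => v
  | k+1, v => pvForA bl k (pvStepA bl v)

def solution (s : String) (skip : String) (index : Int) : String :=
  (s.toList.foldl (fun answer w =>
    answer.push (Char.ofNat (pvForA (skip.toList.map fun c => (c.toNat : Int))
      index.toNat (w.toNat : Int)).toNat)) "")

-- ===== PORT B =====
-- Source B `step`: do-while written with fuel (201 = 1 + A's inner-loop fuel; never exhausted under Pre_)
def pvStepB (bl : List Int) : Nat → Int → Int
  | 0, v => v
  | f+1, v =>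
      if (if v ≤ 121 then v + 1 else v - 25) ∈ bl then
        pvStepB bl f (if v ≤ 121 then v + 1 else v - 25)
      else (if v ≤ 121 then v + 1 else v - 25)

-- Source B `allowed = [v for v in range(97, 123) if v not in blocked]`
def pvAllowedList (bl : List Int) : List Int :=
  (PySem.List.pyRange 97 123 1).filter (fun v => decide (v ∉ bl))

-- Source B `shift`: structural recursion on the remaining step count k; both `allowed.index(v)`
-- (guarded by `v ∈ allowed`, so total) and `(p+k) % len(allowed)` (both operands nonnegative,
-- so Python % = Nat %) are exact here
def pvShiftB (bl : List Int) (allowed : List Int) : Nat → Int → Int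
  | 0, v => v
  | k+1, v =>
      if v ∈ PySem.Set.ofList allowed then
        allowed.getD ((((PySem.List.index? allowed v).getD 0) + (k+1)) % allowed.length) 0
      else pvShiftB bl allowed k (pvStepB bl 201 v)

def solution_alt (s : String) (skip : String) (index : Int) : String :=
  String.ofList (s.toList.map (fun w =>
    Char.ofNat (pvShiftB (PySem.Set.ofList (skip.toList.map fun c => (c.toNat : Int)))
      (pvAllowedList (PySem.Set.ofList (skip.toList.map fun c => (c.toNat : Int))))
      index.toNat (w.toNat : Int)).toNat))

-- ===== PRECONDITION & SPEC =====
-- Pre_ excludes inputs with positive index where skip blocks all 26 lowercase letters: there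
-- A's inner while loop can run forever (e.g. s="a"); on the excluded inputs that do still
-- return (start codes below 'a' with few enough steps) both programs agree anyway.
def Pre_solution (s : String) (skip : String) (index : Int) : Prop :=
  index ≤ 0 ∨ ((List.range 26).any (fun i => skip.toList.all (fun c => c.toNat != 97 + i)) = true)
instance (s : String) (skip : String) (index : Int) : Decidable (Pre_solution s skip index) := by
  unfold Pre_solution; infer_instance

def pvWitness_solution : String × String × Int := ("hello", "ab", 3)

def Spec_solution (s : String) (skip : String) (index : Int) (out : String) : Prop := out = solution_alt s skip index
instance (s : String) (skip : String) (index : Int) (out : String) : Decidable (Spec_solution s skip index out) := by unfold Spec_solution; infer_instance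

-- ===== CLAIM (what is proved, stated in full; the proofs are below) =====
def Claim_equal_solution : Prop := ∀ (s : String) (skip : String) (index : Int), Dom_solution s skip index → Pre_solution s skip index → Spec_solution s skip index (solution s skip index)

-- ===== LEMMAS AND PROOFS =====

-- value reached from w after d cyclic unit advances inside the band 97..122
def pvVal (w : Int) (d : Nat) : Int := 97 + ((w - 97 + (d : Int)) % 26)

lemma pvVal_zero (w : Int) (h1 : 97 ≤ w) (h2 : w ≤ 122) : pvVal w 0 = w := by
  unfold pvVal; omega

lemma pvVal_bounds (w : Int) (d : Nat) : 97 ≤ pvVal w d ∧ pvVal w d ≤ 122 := by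
  unfold pvVal; omega

lemma pvVal_wrap (w : Int) (j : Nat) (h1 : 97 ≤ w) (h2 : w ≤ 122) :
    pvVal (pvWrapA (w+1)) j = pvVal w (j+1) := by
  unfold pvVal pvWrapA; split <;> push_cast <;> omega

lemma pvWrap_band (w : Int) (h1 : 97 ≤ w) (h2 : w ≤ 122) :
    97 ≤ pvWrapA (w+1) ∧ pvWrapA (w+1) ≤ 122 := by
  unfold pvWrapA; split <;> omega

lemma skipLoop_finds (bl : List Int) :
    ∀ (d f : Nat) (w : Int), 97 ≤ w → w ≤ 122 → d + 1 ≤ f →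
      (∀ j < d, pvVal w j ∈ bl) → pvVal w d ∉ bl →
      pvSkipLoopA bl f w = pvVal w d := by
  intro d
  induction d with
  | zero =>
      intro f w h1 h2 hf _ hd
      obtain ⟨f', rfl⟩ : ∃ f', f = f' + 1 := ⟨f - 1, by omega⟩
      rw [pvVal_zero w h1 h2] at hd ⊢
      simp [pvSkipLoopA, hd]
  | succ d ih =>
      intro f w h1 h2 hf hblk hd
      obtain ⟨f', rfl⟩ : ∃ f', f = f' + 1 := ⟨f - 1, by omega⟩
      have h0 : w ∈ bl := by
        have := hblk 0 (by omega); rwa [pvVal_zero w h1 h2] at this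
      have hw' := pvWrap_band w h1 h2
      have step : pvSkipLoopA bl (f'+1) w = pvSkipLoopA bl f' (pvWrapA (w+1)) := by
        simp [pvSkipLoopA, h0]
      rw [step, ih f' (pvWrapA (w+1)) hw'.1 hw'.2 (by omega)
        (fun j hj => by rw [pvVal_wrap w j h1 h2]; exact hblk (j+1) (by omega))
        (by rw [pvVal_wrap w d h1 h2]; exact hd)]
      rw [pvVal_wrap w d h1 h2]

lemma mem_allowed (bl : List Int) (v : Int) :
    v ∈ pvAllowedList bl ↔ (97 ≤ v ∧ v ≤ 122 ∧ v ∉ bl) := by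
  unfold pvAllowedList
  rw [List.mem_filter, PySem.List.mem_pyRange_one]
  constructor
  · rintro ⟨⟨h1, h2⟩, hb⟩
    exact ⟨h1, by omega, by simpa using hb⟩
  · rintro ⟨h1, h2, hb⟩
    exact ⟨⟨h1, by omega⟩, by simpa using hb⟩

lemma allowed_sorted (bl : List Int) : (pvAllowedList bl).Pairwise (· < ·) := by
  unfold pvAllowedList
  exact List.Pairwise.filter _ (PySem.List.pairwise_lt_pyRange_one 97 123)

lemma allowed_nodup (bl : List Int) : (pvAllowedList bl).Nodup := by
  exact (allowed_sorted bl).imp (fun h => ne_of_lt h)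

-- the crux: from an allowed code, one iteration of A's inner `for` body moves to the
-- cyclically next allowed code
lemma index?_getD_of_mem (l : List Int) (v : Int) (hnd : l.Nodup) (h : v ∈ l) :
    (PySem.List.index? l v).getD 0 = List.idxOf v l := by
  rw [PySem.List.index?_eq_idxOf?]
  have hp : List.idxOf v l < l.length := List.idxOf_lt_length_iff.mpr h
  have hs : List.idxOf? v l = some (List.idxOf v l) := by
    rw [List.idxOf?_eq_some_iff]
    refine ⟨hp, List.getElem_idxOf hp, ?_⟩
    intro j hj heq
    have hj2 : j < l.length := lt_trans hj hp
    have h3 := hnd.idxOf_getElem j hj2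
    rw [heq] at h3
    omega
  rw [hs]
  rfl

lemma stepA_cycle (bl : List Int) (v : Int) (hv : v ∈ pvAllowedList bl) :
    pvStepA bl v =
      (pvAllowedList bl).getD
        ((List.idxOf v (pvAllowedList bl) + 1) % (pvAllowedList bl).length) 0 := by
  obtain ⟨hv1, hv2, hv3⟩ := (mem_allowed bl v).mp hv
  have hnd := allowed_nodup bl
  have hmono := List.pairwise_iff_getElem.mp (allowed_sorted bl)
  have hp : List.idxOf v (pvAllowedList bl) < (pvAllowedList bl).length :=
    List.idxOf_lt_length_iff.mpr hv
  have hvp : (pvAllowedList bl)[List.idxOf v (pvAllowedList bl)] = v := List.getElem_idxOf hp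
  have hL : 0 < (pvAllowedList bl).length := Nat.lt_of_le_of_lt (Nat.zero_le _) hp
  have hq : (List.idxOf v (pvAllowedList bl) + 1) % (pvAllowedList bl).length
      < (pvAllowedList bl).length := Nat.mod_lt _ hL
  obtain ⟨he1, he2, he3⟩ := (mem_allowed bl _).mp
    (List.getElem_mem hq)
  have hwb := pvWrap_band v hv1 hv2
  have hwv : pvWrapA (v+1) = v+1 ∨ (v = 122 ∧ pvWrapA (v+1) = 97) := by
    unfold pvWrapA
    split
    · right; constructor <;> omega
    · left; rfl
  -- the cyclically next allowed code is the target of the inner while loop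
  have hd : pvVal (pvWrapA (v+1))
      ((((pvAllowedList bl)[(List.idxOf v (pvAllowedList bl) + 1) % (pvAllowedList bl).length]
        - pvWrapA (v+1)) % 26).toNat) =
      (pvAllowedList bl)[(List.idxOf v (pvAllowedList bl) + 1) % (pvAllowedList bl).length] := by
    unfold pvVal
    rcases hwv with h | ⟨h1, h⟩ <;> rw [h] <;> omega
  have hdle : ((((pvAllowedList bl)[(List.idxOf v (pvAllowedList bl) + 1)
      % (pvAllowedList bl).length] - pvWrapA (v+1)) % 26).toNat) ≤ 25 := by
    rcases hwv with h | ⟨h1, h⟩ <;> rw [h] <;> omega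
  -- minimality: every allowed code is at least as far (cyclically) from the wrap point
  have hmin : ∀ r, (hr : r < (pvAllowedList bl).length) →
      ((((pvAllowedList bl)[(List.idxOf v (pvAllowedList bl) + 1) % (pvAllowedList bl).length]
        - pvWrapA (v+1)) % 26).toNat)
      ≤ (((pvAllowedList bl)[r] - pvWrapA (v+1)) % 26).toNat := by
    intro r hr
    obtain ⟨hr1, hr2, _⟩ := (mem_allowed bl _).mp (List.getElem_mem hr)
    by_cases hcase : List.idxOf v (pvAllowedList bl) + 1 < (pvAllowedList bl).length
    · have hq1 : (List.idxOf v (pvAllowedList bl) + 1) % (pvAllowedList bl).length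
          = List.idxOf v (pvAllowedList bl) + 1 := Nat.mod_eq_of_lt hcase
      have hev : v < (pvAllowedList bl)[(List.idxOf v (pvAllowedList bl) + 1)
          % (pvAllowedList bl).length] := by
        have := hmono (List.idxOf v (pvAllowedList bl))
          ((List.idxOf v (pvAllowedList bl) + 1) % (pvAllowedList bl).length) hp hq (by omega)
        rwa [hvp] at this
      rcases Nat.lt_or_ge r (List.idxOf v (pvAllowedList bl) + 1) with h1 | h2
      · have hle : (pvAllowedList bl)[r] ≤ v := by
          rcases Nat.lt_or_eq_of_le (Nat.le_of_lt_succ h1) with h3 | h3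
          · have := hmono r (List.idxOf v (pvAllowedList bl)) hr hp h3
            rw [hvp] at this; omega
          · subst h3; rw [hvp]
        rcases hwv with h | ⟨hh1, h⟩ <;> rw [h] at * <;> omega
      · have hge : (pvAllowedList bl)[(List.idxOf v (pvAllowedList bl) + 1)
            % (pvAllowedList bl).length] ≤ (pvAllowedList bl)[r] := by
          rcases Nat.lt_or_ge ((List.idxOf v (pvAllowedList bl) + 1) % (pvAllowedList bl).length) r
            with h3 | h3
          · exact le_of_lt (hmono _ r hq hr h3)
          · have : r = (List.idxOf v (pvAllowedList bl) + 1) % (pvAllowedList bl).length := by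
              omega
            subst this; rfl
        rcases hwv with h | ⟨hh1, h⟩ <;> rw [h] at * <;> omega
    · have hpL : List.idxOf v (pvAllowedList bl) + 1 = (pvAllowedList bl).length := by omega
      have hq0 : (List.idxOf v (pvAllowedList bl) + 1) % (pvAllowedList bl).length = 0 := by
        rw [hpL, Nat.mod_self]
      have hEq0 : (pvAllowedList bl)[(List.idxOf v (pvAllowedList bl) + 1)
          % (pvAllowedList bl).length] = (pvAllowedList bl)[0]'hL := by
        have h5 : ((pvAllowedList bl)[(List.idxOf v (pvAllowedList bl) + 1)
            % (pvAllowedList bl).length]? : Option Int)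
            = ((pvAllowedList bl)[0]? : Option Int) := by
          rw [hq0]
        rw [List.getElem?_eq_getElem hq, List.getElem?_eq_getElem hL] at h5
        exact Option.some.inj h5
      have hge : (pvAllowedList bl)[(List.idxOf v (pvAllowedList bl) + 1)
          % (pvAllowedList bl).length] ≤ (pvAllowedList bl)[r] := by
        rcases Nat.eq_zero_or_pos r with h3 | h3
        · subst h3
          exact le_of_eq hEq0
        · rw [hEq0]
          exact le_of_lt (hmono 0 r hL hr h3)
      have hle : (pvAllowedList bl)[r] ≤ v := by
        rcases Nat.lt_or_eq_of_le (Nat.le_of_lt_succ (by omega : r < List.idxOf v (pvAllowedList bl) + 1))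
          with h3 | h3
        · have := hmono r (List.idxOf v (pvAllowedList bl)) hr hp h3
          rw [hvp] at this; omega
        · subst h3; rw [hvp]
      rcases hwv with h | ⟨hh1, h⟩ <;> rw [h] at * <;> omega
  -- all codes strictly before the target on the cyclic walk are blocked
  have hblk : ∀ j, j < ((((pvAllowedList bl)[(List.idxOf v (pvAllowedList bl) + 1)
      % (pvAllowedList bl).length] - pvWrapA (v+1)) % 26).toNat) → pvVal (pvWrapA (v+1)) j ∈ bl := by
    intro j hj
    by_contra hnb
    have hub := pvVal_bounds (pvWrapA (v+1)) j
    have hmem : pvVal (pvWrapA (v+1)) j ∈ pvAllowedList bl :=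
      (mem_allowed bl _).mpr ⟨hub.1, hub.2, hnb⟩
    obtain ⟨r, hr, hrv⟩ := List.getElem_of_mem hmem
    have hjd : (((pvAllowedList bl)[r] - pvWrapA (v+1)) % 26).toNat = j := by
      rw [hrv]
      unfold pvVal
      omega
    have := hmin r hr
    omega
  have hres := skipLoop_finds bl _ 200 (pvWrapA (v+1)) hwb.1 hwb.2 (by omega) hblk
    (by rw [hd]; exact he3)
  unfold pvStepA
  rw [hres, hd, List.getD_eq_getElem?_getD, List.getElem?_eq_getElem hq]
  rfl

lemma forA_cycle (bl : List Int) :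
    ∀ (k : Nat) (v : Int), v ∈ pvAllowedList bl →
      pvForA bl k v =
        (pvAllowedList bl).getD
          ((List.idxOf v (pvAllowedList bl) + k) % (pvAllowedList bl).length) 0 := by
  intro k
  induction k with
  | zero =>
      intro v hv
      have hp : List.idxOf v (pvAllowedList bl) < (pvAllowedList bl).length :=
        List.idxOf_lt_length_iff.mpr hv
      rw [Nat.add_zero, Nat.mod_eq_of_lt hp, List.getD_eq_getElem?_getD,
        List.getElem?_eq_getElem hp]
      rw [List.getElem_idxOf hp]
      rfl
  | succ k ih =>
      intro v hv
      have hp : List.idxOf v (pvAllowedList bl) < (pvAllowedList bl).length :=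
        List.idxOf_lt_length_iff.mpr hv
      have hL : 0 < (pvAllowedList bl).length := Nat.lt_of_le_of_lt (Nat.zero_le _) hp
      have hq : (List.idxOf v (pvAllowedList bl) + 1) % (pvAllowedList bl).length
          < (pvAllowedList bl).length := Nat.mod_lt _ hL
      have hstep := stepA_cycle bl v hv
      have hgd : (pvAllowedList bl).getD
          ((List.idxOf v (pvAllowedList bl) + 1) % (pvAllowedList bl).length) 0
          = (pvAllowedList bl)[(List.idxOf v (pvAllowedList bl) + 1) % (pvAllowedList bl).length] := by
        rw [List.getD_eq_getElem?_getD, List.getElem?_eq_getElem hq]; rfl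
      have hv' : (pvAllowedList bl).getD
          ((List.idxOf v (pvAllowedList bl) + 1) % (pvAllowedList bl).length) 0
          ∈ pvAllowedList bl := by
        rw [hgd]; exact List.getElem_mem hq
      have hidx' : List.idxOf ((pvAllowedList bl).getD
          ((List.idxOf v (pvAllowedList bl) + 1) % (pvAllowedList bl).length) 0)
          (pvAllowedList bl)
          = (List.idxOf v (pvAllowedList bl) + 1) % (pvAllowedList bl).length := by
        rw [hgd]
        exact (allowed_nodup bl).idxOf_getElem _ hq
      have hfa : pvForA bl (k+1) v = pvForA bl k (pvStepA bl v) := rfl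
      rw [hfa, hstep, ih _ hv', hidx', Nat.mod_add_mod]
      have harg : List.idxOf v (pvAllowedList bl) + 1 + k
          = List.idxOf v (pvAllowedList bl) + (k + 1) := by omega
      rw [harg]

lemma stepB_eq_skipLoop (bl : List Int) :
    ∀ (f : Nat) (v : Int), pvStepB bl (f+1) v = pvSkipLoopA bl f (pvWrapA (v+1)) := by
  intro f
  induction f with
  | zero =>
      intro v
      have h : (if v ≤ 121 then v + 1 else v - 25) = pvWrapA (v+1) := by
        unfold pvWrapA; split <;> split <;> omega
      simp only [pvStepB, pvSkipLoopA, h]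
      split <;> rfl
  | succ f ih =>
      intro v
      have h : (if v ≤ 121 then v + 1 else v - 25) = pvWrapA (v+1) := by
        unfold pvWrapA; split <;> split <;> omega
      simp only [pvStepB, pvSkipLoopA, h]
      split
      · exact ih _
      · rfl

lemma stepB_eq_stepA (bl : List Int) (v : Int) : pvStepB bl 201 v = pvStepA bl v :=
  stepB_eq_skipLoop bl 200 v

lemma shiftB_eq_forA (bl : List Int) :
    ∀ (k : Nat) (v : Int), pvShiftB bl (pvAllowedList bl) k v = pvForA bl k v := by
  intro k
  induction k with
  | zero => intro v; rfl
  | succ k ih =>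
      intro v
      by_cases hv : v ∈ pvAllowedList bl
      · have hvS : v ∈ PySem.Set.ofList (pvAllowedList bl) := (PySem.Set.mem_ofList _ v).mpr hv
        have hidx : (PySem.List.index? (pvAllowedList bl) v).getD 0
            = List.idxOf v (pvAllowedList bl) :=
          index?_getD_of_mem _ _ (allowed_nodup bl) hv
        simp only [pvShiftB, if_pos hvS, hidx]
        rw [forA_cycle bl (k+1) v hv]
      · have hvS : v ∉ PySem.Set.ofList (pvAllowedList bl) :=
          fun hx => hv ((PySem.Set.mem_ofList _ v).mp hx)
        simp only [pvShiftB, if_neg hvS]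
        rw [ih (pvStepB bl 201 v), stepB_eq_stepA]
        rfl

lemma foldA_toList (g : Char → Char) :
    ∀ (l : List Char) (acc : String),
      (l.foldl (fun a w => a.push (g w)) acc).toList = acc.toList ++ l.map g := by
  intro l
  induction l with
  | nil => intro acc; simp
  | cons c l ih => intro acc; simp [List.foldl_cons, ih]

lemma skipLoopA_congr (bl bl' : List Int) (h : ∀ x : Int, x ∈ bl ↔ x ∈ bl') :
    ∀ (f : Nat) (v : Int), pvSkipLoopA bl f v = pvSkipLoopA bl' f v := by
  intro f
  induction f with
  | zero => intro v; rfl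
  | succ f ih =>
      intro v
      simp only [pvSkipLoopA]
      by_cases hm : v ∈ bl
      · rw [if_pos hm, if_pos ((h v).mp hm), ih]
      · rw [if_neg hm, if_neg (fun hx => hm ((h v).mpr hx))]

lemma forA_congr (bl bl' : List Int) (h : ∀ x : Int, x ∈ bl ↔ x ∈ bl') :
    ∀ (k : Nat) (v : Int), pvForA bl k v = pvForA bl' k v := by
  intro k
  induction k with
  | zero => intro v; rfl
  | succ k ih =>
      intro v
      show pvForA bl k (pvStepA bl v) = pvForA bl' k (pvStepA bl' v)
      rw [show pvStepA bl v = pvStepA bl' v from skipLoopA_congr bl bl' h 200 _, ih]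

-- ===== VERDICT (by name: the statement is the Claim_ definition above) =====
theorem solution_spec : Claim_equal_solution := by
  intro s skip index _hdom _hpre
  unfold Spec_solution solution solution_alt
  apply String.toList_inj.mp
  rw [foldA_toList]
  simp only [String.toList_ofList]
  have h0 : ("" : String).toList = [] := rfl
  rw [h0, List.nil_append]
  apply List.map_congr_left
  intro w _
  rw [shiftB_eq_forA, forA_congr _ _
    (PySem.Set.mem_ofList (skip.toList.map fun c => (c.toNat : Int)))]
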